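-- pv_equiv track=rewrite | github.com/michalczmiel/katas | coding/aoc/2025/03.py | calculate_largest_joltage_possible
-- ===== SOURCE A (Python) =====
-- def calculate_largest_joltage_possible(bank: str) -> int:
--     """
--     >>> calculate_largest_joltage_possible("987654321111111")
--     98
--     >>> calculate_largest_joltage_possible("811111111111119")
--     89
--     """
--
--     n = len(bank)
--
--     biggest = [0] * n
--
--     max_digit = 0
--
--     for i in range(n - 1, 0, -1):
--         max_digit = max(int(bank[i]), max_digit)
--         biggest[i - 1] = max_digit
--
--     joltage = set()
--
--     for i in range(n):
--         digit = int(bank[i])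
--
--         if biggest[i] == 0:
--             continue
--
--         joltage.add(int(f"{digit}{biggest[i]}"))
--
--     return max(joltage)
-- ===== SOURCE B (Python) =====
-- def calculate_largest_joltage_possible(bank: str) -> int:
--     candidates = []
--     max_digit = 0
--     for ch in reversed(bank):
--         d = int(ch)
--         if max_digit != 0:
--             candidates.append(d * 10 + max_digit)
--         if d > max_digit:
--             max_digit = d
--     return max(candidates)
-- ===== Notes on version B (the rewrite author's own statement) =====
-- stated objective: simpler
-- what changed: Replaced the precomputed suffix-max array plus a second forward scan accumulating a set with a single fused right-to-left pass that maintains the running max digit and appends candidates to a list.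
import Mathlib
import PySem

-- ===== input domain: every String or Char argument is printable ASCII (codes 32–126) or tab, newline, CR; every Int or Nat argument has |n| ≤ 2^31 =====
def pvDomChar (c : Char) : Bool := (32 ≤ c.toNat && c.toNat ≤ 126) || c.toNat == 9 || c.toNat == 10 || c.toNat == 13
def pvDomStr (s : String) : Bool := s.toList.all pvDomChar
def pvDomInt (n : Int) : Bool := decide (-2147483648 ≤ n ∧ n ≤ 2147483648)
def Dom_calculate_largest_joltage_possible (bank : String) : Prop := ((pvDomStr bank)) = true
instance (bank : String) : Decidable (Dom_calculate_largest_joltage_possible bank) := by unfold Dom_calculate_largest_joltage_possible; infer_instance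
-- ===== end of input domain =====

-- B fuses A's suffix-max array + second forward scan + set into one right-to-left pass collecting candidates; return values agree on Pre_.


-- ===== PORT A =====
-- int(c) for a single digit character; exact on Pre_ (all characters are digits there)
def pvDigit (c : Char) : Int := (c.toNat : Int) - 48

-- body of A's first loop: max_digit = max(int(bank[i]), max_digit); biggest[i-1] = max_digit
def pvStepA (cs : List Char) (st : Int × List Int) (i : Int) : Int × List Int :=
  let md := max (pvDigit (PySem.List.pyGetD cs i '0')) st.1
  (md, PySem.List.pySetD st.2 (i - 1) md)

-- body of A's second loop; int(f"{digit}{biggest[i]}") ported as digit*10 + biggest[i],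
-- exact since on the branch taken under Pre_ digit is one digit and biggest[i] one nonzero digit
def pvStepA2 (cs : List Char) (biggest : List Int) (s : PySem.Set Int) (i : Int) : PySem.Set Int :=
  let digit := pvDigit (PySem.List.pyGetD cs i '0')
  let b := PySem.List.pyGetD biggest i 0
  if b = 0 then s else PySem.Set.add s (digit * 10 + b)

def calculate_largest_joltage_possible (bank : String) : Int :=
  let cs := bank.toList
  let n : Int := cs.length
  let st := (PySem.List.pyRange (n - 1) 0 (-1)).foldl (pvStepA cs) (0, List.replicate cs.length 0)
  let joltage := (PySem.List.pyRange 0 n 1).foldl (pvStepA2 cs st.2) PySem.Set.empty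
  -- max(joltage): Python raises on an empty set; Pre_ excludes exactly that
  (PySem.List.max? joltage (fun x => x)).getD 0

-- ===== PORT B =====
-- body of B's loop over reversed(bank)
def pvStepB (st : List Int × Int) (c : Char) : List Int × Int :=
  let d := pvDigit c
  let cands := if st.2 ≠ 0 then st.1 ++ [d * 10 + st.2] else st.1
  (cands, if d > st.2 then d else st.2)

def calculate_largest_joltage_possible_alt (bank : String) : Int :=
  let st := bank.toList.reverse.foldl pvStepB ([], 0)
  -- max(candidates): Python raises on an empty list; Pre_ excludes exactly that
  (PySem.List.max? st.1 (fun x => x)).getD 0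

-- ===== PRECONDITION & SPEC =====
-- Pre_ = exactly where the Python A returns: every character a digit (otherwise int() raises
-- ValueError) and some character after the first nonzero (otherwise max() of an empty set raises ValueError).
def Pre_calculate_largest_joltage_possible (bank : String) : Prop :=
  (bank.toList.all (fun c => c.isDigit) && bank.toList.tail.any (fun c => c != '0')) = true
instance (bank : String) : Decidable (Pre_calculate_largest_joltage_possible bank) := by
  unfold Pre_calculate_largest_joltage_possible; infer_instance

def pvWitness_calculate_largest_joltage_possible : String := "98"

def Spec_calculate_largest_joltage_possible (bank : String) (out : Int) : Prop := out = calculate_largest_joltage_possible_alt bank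
instance (bank : String) (out : Int) : Decidable (Spec_calculate_largest_joltage_possible bank out) := by unfold Spec_calculate_largest_joltage_possible; infer_instance

-- ===== CLAIM (what is proved, stated in full; the proofs are below) =====
def Claim_equal_calculate_largest_joltage_possible : Prop := ∀ (bank : String), Dom_calculate_largest_joltage_possible bank → Pre_calculate_largest_joltage_possible bank → Spec_calculate_largest_joltage_possible bank (calculate_largest_joltage_possible bank)

-- ===== LEMMAS AND PROOFS =====

-- digit values of the whole string
def pvDs (cs : List Char) : List Int := cs.map pvDigit
-- max of a list of ints together with 0
def pvSuf (l : List Int) : Int := l.foldl max 0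
-- the common value set: candidates ds[j]*10 + (max digit strictly right of j), when that max is nonzero
def pvSpec (ds : List Int) (x : Int) : Prop :=
  ∃ j : Nat, j < ds.length ∧ pvSuf (ds.drop (j + 1)) ≠ 0 ∧ x = ds.getD j 0 * 10 + pvSuf (ds.drop (j + 1))

theorem pvSuf_cons (d : Int) (l : List Int) : pvSuf (d :: l) = max d (pvSuf l) := by
  unfold pvSuf; rw [List.foldl_cons, max_comm 0 d, List.foldl_assoc]

theorem pvSpec_cons (d : Int) (ds : List Int) (x : Int) :
    pvSpec (d :: ds) x ↔ (pvSuf ds ≠ 0 ∧ x = d * 10 + pvSuf ds) ∨ pvSpec ds x := by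
  unfold pvSpec
  constructor
  · rintro ⟨j, hj, h1, h2⟩
    cases j with
    | zero => exact Or.inl ⟨by simpa using h1, by simpa using h2⟩
    | succ j => exact Or.inr ⟨j, by simpa using hj, by simpa using h1, by simpa using h2⟩
  · rintro (⟨h1, h2⟩ | ⟨j, hj, h1, h2⟩)
    · exact ⟨0, by simp, by simpa using h1, by simpa using h2⟩
    · exact ⟨j + 1, by simpa using hj, by simpa using h1, by simpa using h2⟩

-- B's fold computes (candidate list with pvSpec membership, suffix max)
theorem pvFoldB (cs : List Char) :
    (cs.foldr (fun c st => pvStepB st c) ([], 0)).2 = pvSuf (pvDs cs) ∧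
    (∀ x, x ∈ (cs.foldr (fun c st => pvStepB st c) ([], 0)).1 ↔ pvSpec (pvDs cs) x) := by
  induction cs with
  | nil => exact ⟨rfl, by intro x; simp [pvSpec, pvSuf, pvDs]⟩
  | cons c t ih =>
    obtain ⟨ih2, ih1⟩ := ih
    rw [List.foldr_cons]
    constructor
    · show (if pvDigit c > _ then _ else _) = _
      rw [ih2, show pvDs (c :: t) = pvDigit c :: pvDs t from rfl, pvSuf_cons]
      rcases le_or_gt (pvDigit c) (pvSuf (pvDs t)) with h | h
      · rw [if_neg (by omega), max_eq_right h]
      · rw [if_pos h, max_eq_left h.le]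
    · intro x
      show x ∈ (if _ ≠ 0 then _ ++ [pvDigit c * 10 + _] else _) ↔ _
      rw [ih2, show pvDs (c :: t) = pvDigit c :: pvDs t from rfl, pvSpec_cons]
      by_cases h : pvSuf (pvDs t) = 0
      · simp only [h, ne_eq, not_true_eq_false, if_false, ih1]
        tauto
      · simp only [ne_eq, h, not_false_eq_true, if_true, List.mem_append, List.mem_singleton, ih1]
        tauto

-- membership in the set built by A's second loop
theorem pvMemFoldA2 (cs : List Char) (biggest : List Int) (l : List Int) (s0 : PySem.Set Int) (x : Int) :
    x ∈ l.foldl (pvStepA2 cs biggest) s0 ↔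
      x ∈ s0 ∨ ∃ i ∈ l, PySem.List.pyGetD biggest i 0 ≠ 0 ∧
        x = pvDigit (PySem.List.pyGetD cs i '0') * 10 + PySem.List.pyGetD biggest i 0 := by
  induction l generalizing s0 with
  | nil => simp
  | cons a t ih =>
    rw [List.foldl_cons, ih]
    unfold pvStepA2
    by_cases hb : PySem.List.pyGetD biggest a 0 = 0
    · simp only [hb, if_true]
      constructor
      · rintro (h | h)
        · exact Or.inl h
        · exact Or.inr (by rcases h with ⟨i, hi, h1, h2⟩; exact ⟨i, List.mem_cons_of_mem _ hi, h1, h2⟩)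
      · rintro (h | ⟨i, hi, h1, h2⟩)
        · exact Or.inl h
        · rcases List.mem_cons.mp hi with rfl | hi
          · exact absurd hb h1
          · exact Or.inr ⟨i, hi, h1, h2⟩
    · simp only [if_neg hb, PySem.Set.mem_add]
      constructor
      · rintro (⟨h | rfl⟩ | h)
        · exact Or.inl h
        · exact Or.inr ⟨a, List.mem_cons_self .., hb, rfl⟩
        · rcases h with ⟨i, hi, h1, h2⟩; exact Or.inr ⟨i, List.mem_cons_of_mem _ hi, h1, h2⟩
      · rintro (h | ⟨i, hi, h1, h2⟩)
        · exact Or.inl (Or.inl h)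
        · rcases List.mem_cons.mp hi with rfl | hi
          · exact Or.inl (Or.inr h2)
          · exact Or.inr ⟨i, hi, h1, h2⟩

theorem pvmax_foldl (T : List Int) (a b : Int) :
    max (List.foldl max a T) b = List.foldl max (max a b) T := by
  induction T generalizing a with
  | nil => rfl
  | cons x t ih =>
    rw [List.foldl_cons, ih, List.foldl_cons]
    congr 1
    rw [max_right_comm]

-- A's first loop: entry j of the array is the max over ds[j+1..s] (seeded with md0), entries ≥ s untouched
theorem pvFoldA (cs : List Char) (s : Nat) (md0 : Int) (bg0 : List Int)
    (hlen : bg0.length = cs.length) (hs : s < cs.length) :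
    ((PySem.List.pyRange (s : Int) 0 (-1)).foldl (pvStepA cs) (md0, bg0)).2.length = cs.length ∧
    ∀ j : Nat, ((PySem.List.pyRange (s : Int) 0 (-1)).foldl (pvStepA cs) (md0, bg0)).2.getD j 0 =
      if j < s then (((pvDs cs).drop (j + 1)).take (s - j)).foldl max md0 else bg0.getD j 0 := by
  induction s generalizing md0 bg0 with
  | zero =>
    rw [show ((0 : Nat) : Int) = 0 from rfl, PySem.List.pyRange_neg_one_eq_nil le_rfl]
    exact ⟨by simpa using hlen, fun j => by simp⟩
  | succ s ih =>
    have h1 : (0 : Int) < ((s + 1 : Nat) : Int) := by exact_mod_cast Nat.succ_pos s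
    rw [PySem.List.pyRange_neg_one_cons h1, List.foldl_cons]
    have hs' : s < cs.length := Nat.lt_of_succ_lt hs
    have hslen : s < bg0.length := by omega
    have hds : s + 1 < (pvDs cs).length := by simpa [pvDs] using hs
    have hd : pvDigit (PySem.List.pyGetD cs ((s + 1 : Nat) : Int) '0') = (pvDs cs).getD (s + 1) 0 := by
      rw [PySem.List.pyGetD_natCast]
      have h2 : s + 1 < cs.length := hs
      simp [List.getD, pvDs, List.getElem?_eq_getElem h2, pvDigit]
    set md1 := max (pvDigit (PySem.List.pyGetD cs ((s + 1 : Nat) : Int) '0')) md0 with hmd1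
    have hstep : pvStepA cs (md0, bg0) ((s + 1 : Nat) : Int) = (md1, bg0.set s md1) := by
      unfold pvStepA
      have hc : ((s + 1 : Nat) : Int) - 1 = (s : Int) := by push_cast; ring
      rw [hc]
      simp only [PySem.List.pySetD, PySem.List.pySet?_natCast _ _ _ hslen, Option.getD_some]
      rw [hmd1]
    have hc2 : ((s + 1 : Nat) : Int) - 1 = ((s : Nat) : Int) := by push_cast; ring
    rw [hstep, hc2]
    obtain ⟨ihl, ihg⟩ := ih md1 (bg0.set s md1) (by simpa using hlen) hs'
    refine ⟨ihl, fun j => ?_⟩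
    rw [ihg j]
    have htake : ∀ j : Nat, j ≤ s → (((pvDs cs).drop (j + 1)).take (s + 1 - j)) =
        (((pvDs cs).drop (j + 1)).take (s - j)) ++ [(pvDs cs).getD (s + 1) 0] := by
      intro j hjs
      rw [show s + 1 - j = (s - j) + 1 by omega, List.take_add_one, List.getElem?_drop,
        show j + 1 + (s - j) = s + 1 by omega, List.getElem?_eq_getElem hds]
      simp [List.getD, List.getElem?_eq_getElem hds]
    by_cases hj : j < s
    · rw [if_pos hj, if_pos (by omega), htake j (by omega), List.foldl_append, List.foldl_cons,
        List.foldl_nil, pvmax_foldl, hmd1, hd, max_comm md0]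
    · by_cases hj2 : j = s
      · rw [if_neg (by omega), if_pos (by omega), hj2, htake s le_rfl]
        simp only [Nat.sub_self, List.take_zero, List.nil_append, List.foldl_cons, List.foldl_nil]
        rw [hmd1, hd, max_comm md0]
        simp [List.getD, hslen]
      · rw [if_neg (by omega), if_neg (by omega)]
        simp [List.getD, List.getElem?_set_ne (by omega : s ≠ j)]

-- A's biggest array holds exactly the suffix maxima (0 beyond the end)
theorem pvBiggest (cs : List Char) (hne : cs ≠ []) (j : Nat) :
    ((PySem.List.pyRange ((cs.length : Int) - 1) 0 (-1)).foldl (pvStepA cs)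
      (0, List.replicate cs.length 0)).2.getD j 0 = pvSuf ((pvDs cs).drop (j + 1)) := by
  have hlen1 : 1 ≤ cs.length := List.length_pos_of_ne_nil hne
  have hcast : ((cs.length : Int) - 1) = ((cs.length - 1 : Nat) : Int) := by
    push_cast [Nat.cast_sub hlen1]; ring
  rw [hcast]
  obtain ⟨_, hg⟩ := pvFoldA cs (cs.length - 1) 0 (List.replicate cs.length 0)
    (by simp) (by omega)
  rw [hg j]
  have hdslen : (pvDs cs).length = cs.length := by simp [pvDs]
  by_cases hj : j < cs.length - 1
  · rw [if_pos hj, List.take_of_length_le (by simp [hdslen]; omega)]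
    rfl
  · rw [if_neg hj]
    have : (pvDs cs).drop (j + 1) = [] := List.drop_eq_nil_of_le (by omega)
    rw [this]
    simp [pvSuf, List.getD]

theorem pvMaxSame (l1 l2 : List Int) (h : ∀ x, x ∈ l1 ↔ x ∈ l2) :
    (PySem.List.max? l1 (fun x => x)).getD 0 = (PySem.List.max? l2 (fun x => x)).getD 0 := by
  cases h1 : PySem.List.max? l1 (fun x => x) with
  | none =>
    cases h2 : PySem.List.max? l2 (fun x => x) with
    | none => rfl
    | some m2 =>
      have := PySem.List.max?_mem h2
      rw [PySem.List.max?_eq_none_iff] at h1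
      rw [← h] at this; simp [h1] at this
  | some m1 =>
    cases h2 : PySem.List.max? l2 (fun x => x) with
    | none =>
      have := PySem.List.max?_mem h1
      rw [PySem.List.max?_eq_none_iff] at h2
      rw [h] at this; simp [h2] at this
    | some m2 =>
      have hm1 := PySem.List.max?_mem h1
      have hm2 := PySem.List.max?_mem h2
      have h12 := PySem.List.max?_isMax h2 m1 ((h m1).mp hm1)
      have h21 := PySem.List.max?_isMax h1 m2 ((h m2).mpr hm2)
      simp at h12 h21 ⊢
      omega

-- total equality of the two ports (Pre_ is about where the PYTHON A returns; the ports agree everywhere)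
theorem pvEq (bank : String) :
    calculate_largest_joltage_possible bank = calculate_largest_joltage_possible_alt bank := by
  unfold calculate_largest_joltage_possible calculate_largest_joltage_possible_alt
  rw [List.foldl_reverse]
  obtain ⟨-, hB⟩ := pvFoldB bank.toList
  rcases eq_or_ne bank.toList [] with hnil | hne
  · rw [hnil]
    rfl
  · apply pvMaxSame
    intro x
    rw [hB x]
    rw [pvMemFoldA2]
    have hmem0 : (x ∈ (PySem.Set.empty : PySem.Set Int)) = False := by
      simp [PySem.Set.empty]
    rw [hmem0]
    have hdslen : (pvDs bank.toList).length = bank.toList.length := by simp [pvDs]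
    constructor
    · rintro (h | ⟨i, hi, h1, h2⟩)
      · exact h.elim
      · rw [PySem.List.mem_pyRange_one] at hi
        obtain ⟨hi0, hin⟩ := hi
        set j := i.toNat with hjdef
        have hij : i = (j : Int) := by omega
        have hjlen : j < bank.toList.length := by omega
        rw [hij] at h1 h2
        rw [PySem.List.pyGetD_natCast, pvBiggest bank.toList hne j] at h1
        rw [PySem.List.pyGetD_natCast, PySem.List.pyGetD_natCast,
          pvBiggest bank.toList hne j] at h2
        refine ⟨j, by omega, h1, ?_⟩
        rw [h2]
        congr 1
        have : pvDigit (bank.toList.getD j '0') = (pvDs bank.toList).getD j 0 := by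
          simp [List.getD, pvDs, List.getElem?_eq_getElem hjlen]
        rw [this]
    · rintro ⟨j, hjlen, h1, h2⟩
      refine Or.inr ⟨(j : Int), ?_, ?_, ?_⟩
      · rw [PySem.List.mem_pyRange_one]
        constructor
        · exact Int.natCast_nonneg j
        · exact_mod_cast by omega
      · rw [PySem.List.pyGetD_natCast, pvBiggest bank.toList hne j]
        exact h1
      · rw [PySem.List.pyGetD_natCast, PySem.List.pyGetD_natCast, pvBiggest bank.toList hne j, h2]
        congr 1
        have hjl : j < bank.toList.length := by omega
        simp [List.getD, pvDs, List.getElem?_eq_getElem hjl]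

-- ===== VERDICT (by name: the statement is the Claim_ definition above) =====
theorem calculate_largest_joltage_possible_spec : Claim_equal_calculate_largest_joltage_possible := by
  intro bank _ _
  exact pvEq bank
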